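-- pv_equiv track=rewrite | github.com/Rick3101/DealBot | handlers/input_validator_mixin.py | validate_selection_input
-- ===== SOURCE A (Python) =====
-- from typing import Optional, List, Union, Any, Dict
--
-- def validate_selection_input(input_text: str, valid_options: List[str],
--                             case_sensitive: bool = False) -> tuple[bool, str, Optional[str]]:
--     """
--     Validate selection input against a list of valid options.
--
--     Args:
--         input_text: User input to validate
--         valid_options: List of valid option strings
--         case_sensitive: Whether validation is case sensitive
--
--     Returns:
--         Tuple of (is_valid: bool, error_message: str, matched_option: str)
--     """
--     if not input_text or not input_text.strip():
--         return False, "❌ Selection cannot be empty", None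
--
--     input_text = input_text.strip()
--
--     # Direct match
--     if case_sensitive:
--         if input_text in valid_options:
--             return True, "", input_text
--     else:
--         input_lower = input_text.lower()
--         for option in valid_options:
--             if option.lower() == input_lower:
--                 return True, "", option
--
--     # Partial match
--     if not case_sensitive:
--         matches = [opt for opt in valid_options if opt.lower().startswith(input_lower)]
--         if len(matches) == 1:
--             return True, "", matches[0]
--         elif len(matches) > 1:
--             return False, f"❌ Ambiguous selection. Did you mean: {', '.join(matches[:3])}?", None
--
--     return False, f"❌ Invalid selection. Valid options: {', '.join(valid_options)}", None
-- ===== SOURCE B (Python) =====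
-- def validate_selection_input(input_text, valid_options, case_sensitive=False):
--     if not input_text or not input_text.strip():
--         return False, "\u274c Selection cannot be empty", None
--
--     text = input_text.strip()
--     key = text if case_sensitive else text.lower()
--     n = len(key)
--
--     # Build a hash index in one preprocessing pass: options by their comparison
--     # key (first occurrence wins) and, case-insensitively, grouped by the
--     # prefix of the query's length; matching is then two dictionary lookups.
--     exact = {}
--     groups = {}
--     for opt in valid_options:
--         k = opt if case_sensitive else opt.lower()
--         exact.setdefault(k, opt)
--         if not case_sensitive:
--             groups.setdefault(k[:n], []).append(opt)
--
--     if key in exact: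
--         return True, "", exact[key]
--
--     matches = groups.get(key, [])
--     if len(matches) == 1:
--         return True, "", matches[0]
--     if len(matches) > 1:
--         return False, f"\u274c Ambiguous selection. Did you mean: {', '.join(matches[:3])}?", None
--     return False, f"\u274c Invalid selection. Valid options: {', '.join(valid_options)}", None
-- ===== Notes on version B (the rewrite author's own statement) =====
-- stated objective: alternative
-- what changed: Replaces A's two sequential scans (early-return exact-match loop, then a prefix-filter comprehension) with one indexing pass that builds two hash maps (comparison key -> first option; query-length prefix -> grouped options), after which matching is plain dictionary lookups.
import Mathlib
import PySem

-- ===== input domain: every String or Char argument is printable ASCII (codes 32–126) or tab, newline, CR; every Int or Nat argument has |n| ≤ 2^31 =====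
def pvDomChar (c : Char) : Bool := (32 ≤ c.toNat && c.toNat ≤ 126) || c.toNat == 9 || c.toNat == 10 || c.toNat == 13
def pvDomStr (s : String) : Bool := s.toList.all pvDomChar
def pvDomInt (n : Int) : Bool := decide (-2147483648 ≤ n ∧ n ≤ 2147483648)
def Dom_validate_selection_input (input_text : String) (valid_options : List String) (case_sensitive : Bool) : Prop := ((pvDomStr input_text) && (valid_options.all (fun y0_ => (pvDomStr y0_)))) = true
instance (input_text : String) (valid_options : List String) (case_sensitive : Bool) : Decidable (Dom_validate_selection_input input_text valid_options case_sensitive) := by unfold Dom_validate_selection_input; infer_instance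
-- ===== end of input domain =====

-- B replaces A's two scans (early-return exact loop, then a prefix filter) with one indexing pass
-- building two dicts (first option per comparison key; options grouped by the query-length prefix),
-- after which matching is dictionary lookups; alternative decomposition, same cost.

-- ===== PORT A =====
-- A's case-insensitive exact-match for-loop with early return
def pvAFindExact (input_lower : String) : List String → Option String
  | [] => none
  | o :: rest => if PySem.Str.lower o == input_lower then some o else pvAFindExact input_lower rest

def validate_selection_input (input_text : String) (valid_options : List String) (case_sensitive : Bool) : Bool × String × Option String :=
  if input_text == "" || PySem.Str.strip input_text == "" then
    (false, "❌ Selection cannot be empty", none)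
  else
    let text := PySem.Str.strip input_text
    if case_sensitive then
      if valid_options.contains text then (true, "", some text)
      else (false, "❌ Invalid selection. Valid options: " ++ PySem.Str.join ", " valid_options, none)
    else
      let input_lower := PySem.Str.lower text
      match pvAFindExact input_lower valid_options with
      | some o => (true, "", some o)
      | none =>
        let matched := valid_options.filter (fun o => PySem.Str.startswith (PySem.Str.lower o) input_lower)
        if matched.length == 1 then (true, "", matched.head?)
        else if matched.length > 1 then
          (false, "❌ Ambiguous selection. Did you mean: " ++ PySem.Str.join ", " (matched.take 3) ++ "?", none)
        else (false, "❌ Invalid selection. Valid options: " ++ PySem.Str.join ", " valid_options, none)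

-- ===== PORT B =====
-- B's loop body: index one option (exact key -> first option; n-prefix group, case-insensitive only)
def pvBStep (case_sensitive : Bool) (n : Int)
    (st : PySem.Dict String String × PySem.Dict String (List String)) (o : String) :
    PySem.Dict String String × PySem.Dict String (List String) :=
  let k := if case_sensitive then o else PySem.Str.lower o
  (st.1.setdefault k o,
   if case_sensitive then st.2 else st.2.modify (PySem.Str.slice k none (some n)) [] (· ++ [o]))

def validate_selection_input_alt (input_text : String) (valid_options : List String) (case_sensitive : Bool) : Bool × String × Option String :=
  if input_text == "" || PySem.Str.strip input_text == "" then
    (false, "❌ Selection cannot be empty", none)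
  else
    let text := PySem.Str.strip input_text
    let key := if case_sensitive then text else PySem.Str.lower text
    let n := PySem.Str.len key
    let st := valid_options.foldl (pvBStep case_sensitive n) (PySem.Dict.empty, PySem.Dict.empty)
    match st.1.get? key with
    | some m => (true, "", some m)
    | none =>
      let found := st.2.getD key []
      if found.length == 1 then (true, "", found.head?)
      else if found.length > 1 then
        (false, "❌ Ambiguous selection. Did you mean: " ++ PySem.Str.join ", " (found.take 3) ++ "?", none)
      else (false, "❌ Invalid selection. Valid options: " ++ PySem.Str.join ", " valid_options, none)

-- ===== PRECONDITION & SPEC =====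
def Spec_validate_selection_input (input_text : String) (valid_options : List String) (case_sensitive : Bool) (out : Bool × String × Option String) : Prop := out = validate_selection_input_alt input_text valid_options case_sensitive
instance (input_text : String) (valid_options : List String) (case_sensitive : Bool) (out : Bool × String × Option String) : Decidable (Spec_validate_selection_input input_text valid_options case_sensitive out) := by unfold Spec_validate_selection_input; infer_instance

-- ===== CLAIM (what is proved, stated in full; the proofs are below) =====
def Claim_equal_validate_selection_input : Prop := ∀ (input_text : String) (valid_options : List String) (case_sensitive : Bool), Dom_validate_selection_input input_text valid_options case_sensitive → Spec_validate_selection_input input_text valid_options case_sensitive (validate_selection_input input_text valid_options case_sensitive)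

-- ===== LEMMAS AND PROOFS =====

-- B's paired fold splits into its two dict folds (case-sensitive shape)
theorem pvBStep_fold_true (n : Int) (opts : List String)
    (d1 : PySem.Dict String String) (d2 : PySem.Dict String (List String)) :
    opts.foldl (pvBStep true n) (d1, d2)
      = (opts.foldl (fun d o => d.setdefault o o) d1, d2) := by
  induction opts generalizing d1 with
  | nil => rfl
  | cons o rest ih => simp [pvBStep, ih]

-- B's paired fold splits into its two dict folds (case-insensitive shape)
theorem pvBStep_fold_false (n : Int) (opts : List String)
    (d1 : PySem.Dict String String) (d2 : PySem.Dict String (List String)) :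
    opts.foldl (pvBStep false n) (d1, d2)
      = (opts.foldl (fun d o => d.setdefault (PySem.Str.lower o) o) d1,
         opts.foldl (fun d o =>
           d.modify (PySem.Str.slice (PySem.Str.lower o) none (some n)) [] (· ++ [o])) d2) := by
  induction opts generalizing d1 d2 with
  | nil => rfl
  | cons o rest ih => simp [pvBStep, ih]

-- B's exact dict, case-sensitive: lookup = membership, value = the key itself
theorem pvExactFold_cs (k : String) (opts : List String) :
    (opts.foldl (fun d o => d.setdefault o o) (PySem.Dict.empty : PySem.Dict String String)).get? k
      = if opts.contains k then some k else none := by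
  suffices h : ∀ d : PySem.Dict String String,
      (opts.foldl (fun d o => d.setdefault o o) d).get? k
        = (d.get? k).or (if opts.contains k then some k else none) by
    simpa using h PySem.Dict.empty
  induction opts with
  | nil => intro d; simp
  | cons o rest ih =>
    intro d
    simp only [List.foldl_cons]
    rw [ih]
    by_cases h : o = k
    · subst h
      rw [PySem.Dict.get?_setdefault_self]
      cases d.get? o <;> simp
    · rw [PySem.Dict.get?_setdefault_of_ne d o (Ne.symm h)]
      have h2 : ¬ k = o := fun e => h e.symm
      simp [h2]

-- B's exact dict, case-insensitive: lookup = A's first-exact-match loop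
theorem pvExactFold_ci (k : String) (opts : List String) :
    (opts.foldl (fun d o => d.setdefault (PySem.Str.lower o) o)
        (PySem.Dict.empty : PySem.Dict String String)).get? k
      = pvAFindExact k opts := by
  suffices h : ∀ d : PySem.Dict String String,
      (opts.foldl (fun d o => d.setdefault (PySem.Str.lower o) o) d).get? k
        = (d.get? k).or (pvAFindExact k opts) by
    simpa using h PySem.Dict.empty
  induction opts with
  | nil => intro d; simp [pvAFindExact]
  | cons o rest ih =>
    intro d
    simp only [List.foldl_cons, pvAFindExact]
    rw [ih]
    by_cases h : PySem.Str.lower o = k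
    · subst h
      rw [PySem.Dict.get?_setdefault_self]
      simp only [beq_self_eq_true, if_true]
      cases d.get? (PySem.Str.lower o) <;> simp
    · rw [PySem.Dict.get?_setdefault_of_ne d o (Ne.symm h)]
      have h1 : (PySem.Str.lower o == k) = false := beq_eq_false_iff_ne.2 h
      simp [h1]

theorem pvStrBeq_iff (a b : String) : (a == b) = true ↔ a.toList = b.toList := by
  constructor
  · intro h; simp_all
  · intro h; exact beq_iff_eq.2 (String.toList_inj.mp h)

-- the query-length prefix of the lowered option equals the key iff the option starts with the key
theorem pvPrefEq (o key : String) :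
    (PySem.Str.slice (PySem.Str.lower o) none (some (PySem.Str.len key)) == key)
      = PySem.Str.startswith (PySem.Str.lower o) key := by
  have hsl : (PySem.Str.slice (PySem.Str.lower o) none (some (PySem.Str.len key))).toList
      = (PySem.Str.lower o).toList.take key.toList.length := by
    simp [PySem.Str.len_eq, PySem.List.slice_to_natCast]
  cases hs : PySem.Str.startswith (PySem.Str.lower o) key with
  | true =>
    have hpre : key.toList <+: (PySem.Str.lower o).toList := by
      have h := PySem.Chars.startswith_iff ((PySem.Str.lower o).toList) key.toList
      simp only [PySem.Str.startswith_eq] at hs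
      exact h.mp hs
    exact (pvStrBeq_iff _ _).2 (by rw [hsl]; exact (List.prefix_iff_eq_take.mp hpre).symm)
  | false =>
    cases hb : (PySem.Str.slice (PySem.Str.lower o) none (some (PySem.Str.len key)) == key) with
    | false => rfl
    | true =>
      exfalso
      have htake : (PySem.Str.lower o).toList.take key.toList.length = key.toList := by
        rw [← hsl]; exact (pvStrBeq_iff _ _).1 hb
      have hpre : key.toList <+: (PySem.Str.lower o).toList :=
        List.prefix_iff_eq_take.mpr htake.symm
      have h1 : PySem.Str.startswith (PySem.Str.lower o) key = true := by
        simp only [PySem.Str.startswith_eq]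
        exact (PySem.Chars.startswith_iff _ _).mpr hpre
      rw [hs] at h1; exact absurd h1 (by simp)

-- B's groups dict: the entry at the key is exactly A's prefix filter
theorem pvGroupsFold_getD (key : String) (opts : List String) :
    (opts.foldl (fun d o =>
        d.modify (PySem.Str.slice (PySem.Str.lower o) none (some (PySem.Str.len key))) [] (· ++ [o]))
      (PySem.Dict.empty : PySem.Dict String (List String))).getD key []
      = opts.filter (fun o => PySem.Str.startswith (PySem.Str.lower o) key) := by
  have h := PySem.Dict.getD_foldl_modify_append
      (opts.map (fun o => (PySem.Str.slice (PySem.Str.lower o) none (some (PySem.Str.len key)), o)))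
      (PySem.Dict.empty : PySem.Dict String (List String)) key
  rw [List.foldl_map] at h
  simp only [List.filter_map, Function.comp_def, List.map_map, PySem.Dict.getD_empty,
    List.nil_append] at h
  rw [h]
  have hmapid : ∀ l : List String,
      l.map (fun o => (PySem.Str.slice (PySem.Str.lower o) none (some (PySem.Str.len key)), o).2) = l := by
    intro l; simp
  rw [hmapid]
  exact List.filter_congr (fun o _ => pvPrefEq o key)

-- ===== VERDICT (by name: the statement is the Claim_ definition above) =====
theorem validate_selection_input_spec : Claim_equal_validate_selection_input := by
  intro input_text valid_options case_sensitive _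
  unfold Spec_validate_selection_input validate_selection_input validate_selection_input_alt
  by_cases hempty : (input_text == "" || PySem.Str.strip input_text == "") = true
  · rw [if_pos hempty, if_pos hempty]
  · rw [if_neg hempty, if_neg hempty]
    cases case_sensitive with
    | true =>
      dsimp only
      simp only [reduceIte]
      rw [pvBStep_fold_true, pvExactFold_cs]
      by_cases hc : valid_options.contains (PySem.Str.strip input_text) = true
      · rw [if_pos hc, if_pos hc]
      · rw [if_neg hc, if_neg hc]
        simp [PySem.Dict.getD_empty]
    | false =>
      dsimp only
      simp only [if_neg Bool.false_ne_true]
      rw [pvBStep_fold_false, pvExactFold_ci, pvGroupsFold_getD]
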